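-- pv_equiv track=rewrite | github.com/sandeeipPanday/threatanalysis | bduck_gitlab_sca/compare_sca_reports.py | analyze_advantages
-- ===== SOURCE A (Python) =====
-- from collections import defaultdict
--
-- def analyze_advantages(gitlab_deps, blackduck_deps):
--     analysis = defaultdict(list)
--
--     # Coverage
--     analysis["Coverage"].append(f"GitLab detected {len(gitlab_deps)} dependencies")
--     analysis["Coverage"].append(f"BlackDuck detected {len(blackduck_deps)} dependencies")
--
--     # Vulnerability depth
--     total_gitlab_vulns = sum(len(dep.get("vulnerabilities", [])) for dep in gitlab_deps.values())
--     total_blackduck_vulns = sum(len(dep.get("vulnerabilities", [])) for dep in blackduck_deps.values())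
--     analysis["Vulnerability Detection"].append(f"GitLab found {total_gitlab_vulns} vulnerabilities")
--     analysis["Vulnerability Detection"].append(f"BlackDuck found {total_blackduck_vulns} vulnerabilities")
--
--     # License detection
--     gitlab_licenses = {lic for dep in gitlab_deps.values() for lic in dep.get("licenses", [])}
--     blackduck_licenses = {lic for dep in blackduck_deps.values() for lic in dep.get("licenses", [])}
--     analysis["License Coverage"].append(f"GitLab identified {len(gitlab_licenses)} unique licenses")
--     analysis["License Coverage"].append(f"BlackDuck identified {len(blackduck_licenses)} unique licenses")
--
--     # Transitive dependencies
--     analysis["Transitive Dependency Handling"].append("BlackDuck typically handles transitive dependencies better due to deeper SBOM analysis")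
--     analysis["Transitive Dependency Handling"].append("GitLab may miss some transitive packages depending on scanner configuration")
--
--     # Metadata richness
--     analysis["Metadata"].append("BlackDuck provides more detailed metadata including CVSS scores, remediation guidance, and policy violations")
--     analysis["Metadata"].append("GitLab focuses on pipeline integration and basic vulnerability info")
--
--     return analysis
-- ===== SOURCE B (Python) =====
-- from collections import defaultdict
--
-- def _collect(deps, field):
--     # concatenate the given field's lists across all dependency records
--     flat = []
--     for dep in deps.values():
--         flat.extend(dep.get(field, []))
--     return flat
--
-- def _count_runs(items):
--     # number of runs of equal adjacent elements (= distinct count when sorted)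
--     runs = 0
--     prev = None
--     for x in items:
--         if prev is None or x != prev:
--             runs += 1
--         prev = x
--     return runs
--
-- def analyze_advantages(gitlab_deps, blackduck_deps):
--     g_vulns = len(_collect(gitlab_deps, "vulnerabilities"))
--     b_vulns = len(_collect(blackduck_deps, "vulnerabilities"))
--     g_lics = _count_runs(sorted(_collect(gitlab_deps, "licenses")))
--     b_lics = _count_runs(sorted(_collect(blackduck_deps, "licenses")))
--     return defaultdict(list, {
--         "Coverage": [
--             f"GitLab detected {len(gitlab_deps)} dependencies",
--             f"BlackDuck detected {len(blackduck_deps)} dependencies",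
--         ],
--         "Vulnerability Detection": [
--             f"GitLab found {g_vulns} vulnerabilities",
--             f"BlackDuck found {b_vulns} vulnerabilities",
--         ],
--         "License Coverage": [
--             f"GitLab identified {g_lics} unique licenses",
--             f"BlackDuck identified {b_lics} unique licenses",
--         ],
--         "Transitive Dependency Handling": [
--             "BlackDuck typically handles transitive dependencies better due to deeper SBOM analysis",
--             "GitLab may miss some transitive packages depending on scanner configuration",
--         ],
--         "Metadata": [
--             "BlackDuck provides more detailed metadata including CVSS scores, remediation guidance, and policy violations",
--             "GitLab focuses on pipeline integration and basic vulnerability info",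
--         ],
--     })
-- ===== Notes on version B (the rewrite author's own statement) =====
-- stated objective: alternative
-- what changed: B flattens each field once (counting vulnerabilities as the length of the concatenated list) and counts unique licenses by sorting the flattened license list and counting runs of equal adjacent elements, replacing A's per-record length sum and hash-set comprehensions; the result dict is built once as a literal.
import Mathlib
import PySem

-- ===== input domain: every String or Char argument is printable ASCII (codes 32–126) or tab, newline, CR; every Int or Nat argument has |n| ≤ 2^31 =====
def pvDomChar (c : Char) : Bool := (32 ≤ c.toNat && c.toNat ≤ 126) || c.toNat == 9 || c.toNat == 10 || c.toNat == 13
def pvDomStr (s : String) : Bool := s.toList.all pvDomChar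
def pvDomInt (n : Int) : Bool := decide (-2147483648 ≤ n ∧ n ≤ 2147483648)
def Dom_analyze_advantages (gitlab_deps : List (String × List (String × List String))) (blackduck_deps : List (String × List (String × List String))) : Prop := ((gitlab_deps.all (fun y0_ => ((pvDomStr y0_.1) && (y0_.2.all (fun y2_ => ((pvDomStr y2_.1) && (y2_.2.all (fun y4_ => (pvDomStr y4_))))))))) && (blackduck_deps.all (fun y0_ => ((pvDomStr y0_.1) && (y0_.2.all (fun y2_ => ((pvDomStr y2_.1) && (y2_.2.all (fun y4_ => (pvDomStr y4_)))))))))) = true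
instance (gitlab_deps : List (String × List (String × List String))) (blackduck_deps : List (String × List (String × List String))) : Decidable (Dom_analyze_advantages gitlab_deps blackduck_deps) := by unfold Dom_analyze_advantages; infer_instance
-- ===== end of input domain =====

-- B counts vulnerabilities by flattening once and unique licenses by sort-then-scan (run counting) instead of A's per-value sums and hash sets; equal return value.

-- ===== PORT A =====
def analyze_advantages (gitlab_deps : List (String × List (String × List String))) (blackduck_deps : List (String × List (String × List String))) : List (String × List String) :=
  let analysis : PySem.Dict String (List String) := PySem.Dict.empty
  let analysis := analysis.modify "Coverage" [] (· ++ ["GitLab detected " ++ PySem.Int.toStr (gitlab_deps.length : Int) ++ " dependencies"])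
  let analysis := analysis.modify "Coverage" [] (· ++ ["BlackDuck detected " ++ PySem.Int.toStr (blackduck_deps.length : Int) ++ " dependencies"])
  let total_gitlab_vulns : Int := (gitlab_deps.map (fun kv => (((PySem.Dict.mk kv.2).getD "vulnerabilities" []).length : Int))).sum
  let total_blackduck_vulns : Int := (blackduck_deps.map (fun kv => (((PySem.Dict.mk kv.2).getD "vulnerabilities" []).length : Int))).sum
  let analysis := analysis.modify "Vulnerability Detection" [] (· ++ ["GitLab found " ++ PySem.Int.toStr total_gitlab_vulns ++ " vulnerabilities"])
  let analysis := analysis.modify "Vulnerability Detection" [] (· ++ ["BlackDuck found " ++ PySem.Int.toStr total_blackduck_vulns ++ " vulnerabilities"])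
  let gitlab_licenses : PySem.Set String := PySem.Set.ofList (gitlab_deps.flatMap (fun kv => (PySem.Dict.mk kv.2).getD "licenses" []))
  let blackduck_licenses : PySem.Set String := PySem.Set.ofList (blackduck_deps.flatMap (fun kv => (PySem.Dict.mk kv.2).getD "licenses" []))
  let analysis := analysis.modify "License Coverage" [] (· ++ ["GitLab identified " ++ PySem.Int.toStr (PySem.Set.len gitlab_licenses) ++ " unique licenses"])
  let analysis := analysis.modify "License Coverage" [] (· ++ ["BlackDuck identified " ++ PySem.Int.toStr (PySem.Set.len blackduck_licenses) ++ " unique licenses"])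
  let analysis := analysis.modify "Transitive Dependency Handling" [] (· ++ ["BlackDuck typically handles transitive dependencies better due to deeper SBOM analysis"])
  let analysis := analysis.modify "Transitive Dependency Handling" [] (· ++ ["GitLab may miss some transitive packages depending on scanner configuration"])
  let analysis := analysis.modify "Metadata" [] (· ++ ["BlackDuck provides more detailed metadata including CVSS scores, remediation guidance, and policy violations"])
  let analysis := analysis.modify "Metadata" [] (· ++ ["GitLab focuses on pipeline integration and basic vulnerability info"])
  analysis.items

-- ===== PORT B =====
-- _collect: concatenate the given field's lists across all dependency records
def pvCollect (deps : List (String × List (String × List String))) (field : String) : List String :=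
  deps.foldl (fun flat kv => flat ++ (PySem.Dict.mk kv.2).getD field []) []

-- loop body of _count_runs (state = (runs, prev))
def pvRunsStep (acc : Int × Option String) (x : String) : Int × Option String :=
  ((match acc.2 with
    | none => acc.1 + 1
    | some p => if x ≠ p then acc.1 + 1 else acc.1), some x)

-- _count_runs: number of runs of equal adjacent elements
def pvCountRuns (items : List String) : Int :=
  (items.foldl pvRunsStep ((0 : Int), (none : Option String))).1

def analyze_advantages_alt (gitlab_deps : List (String × List (String × List String))) (blackduck_deps : List (String × List (String × List String))) : List (String × List String) :=
  let g_vulns : Int := ((pvCollect gitlab_deps "vulnerabilities").length : Int)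
  let b_vulns : Int := ((pvCollect blackduck_deps "vulnerabilities").length : Int)
  let g_lics : Int := pvCountRuns (PySem.List.sorted (pvCollect gitlab_deps "licenses") (fun x => x) false)
  let b_lics : Int := pvCountRuns (PySem.List.sorted (pvCollect blackduck_deps "licenses") (fun x => x) false)
  [ ("Coverage",
      ["GitLab detected " ++ PySem.Int.toStr (gitlab_deps.length : Int) ++ " dependencies",
       "BlackDuck detected " ++ PySem.Int.toStr (blackduck_deps.length : Int) ++ " dependencies"]),
    ("Vulnerability Detection",
      ["GitLab found " ++ PySem.Int.toStr g_vulns ++ " vulnerabilities",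
       "BlackDuck found " ++ PySem.Int.toStr b_vulns ++ " vulnerabilities"]),
    ("License Coverage",
      ["GitLab identified " ++ PySem.Int.toStr g_lics ++ " unique licenses",
       "BlackDuck identified " ++ PySem.Int.toStr b_lics ++ " unique licenses"]),
    ("Transitive Dependency Handling",
      ["BlackDuck typically handles transitive dependencies better due to deeper SBOM analysis",
       "GitLab may miss some transitive packages depending on scanner configuration"]),
    ("Metadata",
      ["BlackDuck provides more detailed metadata including CVSS scores, remediation guidance, and policy violations",
       "GitLab focuses on pipeline integration and basic vulnerability info"]) ]

-- ===== PRECONDITION & SPEC =====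
def Spec_analyze_advantages (gitlab_deps : List (String × List (String × List String))) (blackduck_deps : List (String × List (String × List String))) (out : List (String × List String)) : Prop := out = analyze_advantages_alt gitlab_deps blackduck_deps
instance (gitlab_deps : List (String × List (String × List String))) (blackduck_deps : List (String × List (String × List String))) (out : List (String × List String)) : Decidable (Spec_analyze_advantages gitlab_deps blackduck_deps out) := by unfold Spec_analyze_advantages; infer_instance

-- ===== CLAIM (what is proved, stated in full; the proofs are below) =====
def Claim_equal_analyze_advantages : Prop := ∀ (gitlab_deps : List (String × List (String × List String))) (blackduck_deps : List (String × List (String × List String))), Dom_analyze_advantages gitlab_deps blackduck_deps → Spec_analyze_advantages gitlab_deps blackduck_deps (analyze_advantages gitlab_deps blackduck_deps)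

-- ===== LEMMAS AND PROOFS =====

theorem pvCollect_eq (deps : List (String × List (String × List String))) (field : String) :
    pvCollect deps field = deps.flatMap (fun kv => (PySem.Dict.mk kv.2).getD field []) := by
  simpa [pvCollect] using
    PySem.List.foldl_append_eq_flatMap (fun kv : String × List (String × List String) => (PySem.Dict.mk kv.2).getD field []) deps []

-- B's flattened vulnerability count is A's sum of per-record lengths
theorem pvVulns (deps : List (String × List (String × List String))) :
    ((pvCollect deps "vulnerabilities").length : Int)
      = (deps.map (fun kv => (((PySem.Dict.mk kv.2).getD "vulnerabilities" []).length : Int))).sum := by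
  rw [pvCollect_eq, List.length_flatMap, Nat.cast_list_sum, List.map_map]
  rfl

theorem pvCardInsertErase (t : Finset String) (y : String) :
    (insert y t).card = (t.erase y).card + 1 := by
  by_cases h : y ∈ t
  · rw [Finset.insert_eq_self.mpr h]
    exact (Finset.card_erase_add_one h).symm
  · rw [Finset.card_insert_of_notMem h, Finset.erase_eq_of_notMem h]

-- run-counting invariant on a sorted tail: every element equal to prev is adjacent-skipped,
-- every other distinct element starts exactly one run
theorem pvRunsAux (s : List String) : ∀ (c : Int) (x : String),
    s.Pairwise (· ≤ ·) → (∀ y ∈ s, x ≤ y) →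
    (s.foldl pvRunsStep (c, some x)).1 = c + (((s.toFinset.erase x).card : Nat) : Int) := by
  induction s with
  | nil => intro c x _ _; simp
  | cons y t ih =>
    intro c x hp hle
    have hxy : x ≤ y := hle y (List.mem_cons_self)
    have hyt : ∀ z ∈ t, y ≤ z := (List.pairwise_cons.mp hp).1
    have hpt : t.Pairwise (· ≤ ·) := (List.pairwise_cons.mp hp).2
    by_cases hxe : y = x
    · subst hxe
      have : pvRunsStep (c, some y) y = (c, some y) := by simp [pvRunsStep]
      rw [List.foldl_cons, this, ih c y hpt hyt]
      simp [Finset.erase_insert_eq_erase]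
    · have hstep : pvRunsStep (c, some x) y = (c + 1, some y) := by simp [pvRunsStep, hxe]
      rw [List.foldl_cons, hstep, ih (c + 1) y hpt hyt]
      have hxlt : x < y := lt_of_le_of_ne hxy (fun h => hxe h.symm)
      have hxnot : x ∉ insert y t.toFinset := by
        simp only [Finset.mem_insert, List.mem_toFinset]
        rintro (rfl | hx)
        · exact absurd rfl hxe
        · exact absurd (hyt x hx) (not_le.mpr hxlt)
      rw [List.toFinset_cons, Finset.erase_eq_of_notMem hxnot, pvCardInsertErase]
      push_cast
      ring

-- on a sorted list, the number of runs is the number of distinct elements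
theorem pvRunsSorted (s : List String) (hp : s.Pairwise (· ≤ ·)) :
    pvCountRuns s = ((s.toFinset.card : Nat) : Int) := by
  cases s with
  | nil => simp [pvCountRuns]
  | cons y t =>
    have hstep : pvRunsStep (0, none) y = (1, some y) := by simp [pvRunsStep]
    have hyt := (List.pairwise_cons.mp hp).1
    have hpt := (List.pairwise_cons.mp hp).2
    rw [pvCountRuns, List.foldl_cons, hstep, pvRunsAux t 1 y hpt hyt,
      List.toFinset_cons, pvCardInsertErase]
    push_cast
    ring

-- B's sort-then-count-runs equals A's set cardinality
theorem pvLic (deps : List (String × List (String × List String))) :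
    pvCountRuns (PySem.List.sorted (pvCollect deps "licenses") (fun x => x) false)
      = PySem.Set.len (PySem.Set.ofList (deps.flatMap (fun kv => (PySem.Dict.mk kv.2).getD "licenses" []))) := by
  rw [pvCollect_eq]
  set flat := deps.flatMap (fun kv => (PySem.Dict.mk kv.2).getD "licenses" []) with hflat
  have hp : (PySem.List.sorted flat (fun x => x) false).Pairwise (· ≤ ·) :=
    PySem.List.sorted_pairwise flat (fun x => x)
  rw [pvRunsSorted _ hp]
  have hfin : (PySem.List.sorted flat (fun x => x) false).toFinset = (PySem.Set.ofList flat : List String).toFinset := by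
    ext z
    simp [List.mem_toFinset, PySem.Set.mem_ofList,
      (PySem.List.sorted_perm flat (fun x => x) false).mem_iff]
  rw [hfin, List.toFinset_card_of_nodup (PySem.Set.nodup_ofList flat)]
  simp [PySem.Set.len]

-- A's modify chain on the fixed keys produces the literal assoc list
theorem pvChain (a b c d e f : String) :
    (((((((((((PySem.Dict.empty : PySem.Dict String (List String)).modify "Coverage" [] (· ++ [a])).modify "Coverage" [] (· ++ [b])).modify "Vulnerability Detection" [] (· ++ [c])).modify "Vulnerability Detection" [] (· ++ [d])).modify "License Coverage" [] (· ++ [e])).modify "License Coverage" [] (· ++ [f])).modify "Transitive Dependency Handling" [] (· ++ ["BlackDuck typically handles transitive dependencies better due to deeper SBOM analysis"])).modify "Transitive Dependency Handling" [] (· ++ ["GitLab may miss some transitive packages depending on scanner configuration"])).modify "Metadata" [] (· ++ ["BlackDuck provides more detailed metadata including CVSS scores, remediation guidance, and policy violations"])).modify "Metadata" [] (· ++ ["GitLab focuses on pipeline integration and basic vulnerability info"])).items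
    = [ ("Coverage", [a, b]),
        ("Vulnerability Detection", [c, d]),
        ("License Coverage", [e, f]),
        ("Transitive Dependency Handling",
          ["BlackDuck typically handles transitive dependencies better due to deeper SBOM analysis",
           "GitLab may miss some transitive packages depending on scanner configuration"]),
        ("Metadata",
          ["BlackDuck provides more detailed metadata including CVSS scores, remediation guidance, and policy violations",
           "GitLab focuses on pipeline integration and basic vulnerability info"]) ] := by
  simp [PySem.Dict.modify, PySem.Dict.insert, PySem.Dict.contains, PySem.Dict.getD, PySem.Dict.get?,
    PySem.Dict.empty]

-- ===== VERDICT (by name: the statement is the Claim_ definition above) =====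
theorem analyze_advantages_spec : Claim_equal_analyze_advantages := by
  intro g b _
  show _ = _
  simp only [analyze_advantages, analyze_advantages_alt, pvChain, pvVulns, pvLic]
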